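-- pv_equiv track=rewrite | github.com/gianllopez/Tagger | taglogic/utilities.py | replchars
-- ===== SOURCE A (Python) =====
-- def replchars(expression, mode='replace'):
--     dictchars = {
--         '\\' : '(char1)',
--         '/' : '(char2)',
--         ':' : '(char3)',
--         '*' : '(char4)',
--         '?' : '(char5)',
--         '"' : '(char6)',
--         '<' : '(char7)',
--         '>' : '(char8)',
--         '|' : '(char9)'
--                 }
--     for char in dictchars:
--         if mode == 'replace':
--             expression = expression.replace(char, dictchars[char])
--         if mode == 'unreplace':
--             expression = expression.replace(dictchars[char], char)
--     return expression
-- ===== SOURCE B (Python) =====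
-- def replchars(expression, mode='replace'):
--     enc = {'\\': '(char1)', '/': '(char2)', ':': '(char3)', '*': '(char4)',
--            '?': '(char5)', '"': '(char6)', '<': '(char7)', '>': '(char8)',
--            '|': '(char9)'}
--     if mode == 'replace':
--         return ''.join(enc.get(c, c) for c in expression)
--     if mode == 'unreplace':
--         dec = {v: k for k, v in enc.items()}
--         out = []
--         i = 0
--         n = len(expression)
--         while i < n:
--             tok = expression[i:i + 7]
--             if tok in dec:
--                 out.append(dec[tok])
--                 i += 7
--             else:
--                 out.append(expression[i])
--                 i += 1
--         return ''.join(out)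
--     return expression
-- ===== Notes on version B (the rewrite author's own statement) =====
-- stated objective: alternative
-- what changed: B replaces A's nine sequential full-string str.replace passes with a single table-driven pass per mode: a per-character dict lookup when encoding, and one left-to-right scan that recognises the seven-character placeholder tokens via an inverse dict when decoding; any other mode returns the input unchanged as in A.
import Mathlib
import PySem

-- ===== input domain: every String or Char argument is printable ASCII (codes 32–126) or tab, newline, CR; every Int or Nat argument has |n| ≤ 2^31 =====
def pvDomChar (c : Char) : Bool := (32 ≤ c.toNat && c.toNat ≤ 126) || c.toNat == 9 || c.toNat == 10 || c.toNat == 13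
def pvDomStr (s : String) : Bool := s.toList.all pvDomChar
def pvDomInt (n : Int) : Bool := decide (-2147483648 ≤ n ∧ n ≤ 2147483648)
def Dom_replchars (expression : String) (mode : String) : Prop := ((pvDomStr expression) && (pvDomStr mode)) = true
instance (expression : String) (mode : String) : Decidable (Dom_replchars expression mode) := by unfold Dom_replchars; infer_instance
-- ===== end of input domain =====

-- B replaces A's nine sequential full-string replace passes with one table-driven
-- left-to-right pass per mode (alternative decomposition; not claimed faster).

-- ===== PORT A =====
def pvDictchars : PySem.Dict String String :=
  PySem.Dict.ofList
    [("\\", "(char1)"), ("/", "(char2)"), (":", "(char3)"), ("*", "(char4)"),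
     ("?", "(char5)"), ("\"", "(char6)"), ("<", "(char7)"), (">", "(char8)"), ("|", "(char9)")]

def replchars (expression : String) (mode : String) : String :=
  pvDictchars.keys.foldl
    (fun e c =>
      let e := if mode == "replace" then PySem.Str.replace e c (pvDictchars.getD c "") else e
      if mode == "unreplace" then PySem.Str.replace e (pvDictchars.getD c "") c else e)
    expression

-- ===== PORT B =====
-- enc.get(c, c) of Source B, as a branch chain over the nine literal keys
def encTok (c : Char) : List Char :=
  if c = '\\' then "(char1)".toList
  else if c = '/' then "(char2)".toList
  else if c = ':' then "(char3)".toList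
  else if c = '*' then "(char4)".toList
  else if c = '?' then "(char5)".toList
  else if c = '"' then "(char6)".toList
  else if c = '<' then "(char7)".toList
  else if c = '>' then "(char8)".toList
  else if c = '|' then "(char9)".toList
  else [c]

-- dec lookup of Source B: tok in dec / dec[tok] combined
def decTok (t : List Char) : Option Char :=
  if t = "(char1)".toList then some '\\'
  else if t = "(char2)".toList then some '/'
  else if t = "(char3)".toList then some ':'
  else if t = "(char4)".toList then some '*'
  else if t = "(char5)".toList then some '?'
  else if t = "(char6)".toList then some '"'
  else if t = "(char7)".toList then some '<'
  else if t = "(char8)".toList then some '>'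
  else if t = "(char9)".toList then some '|'
  else none

-- the while loop of Source B's 'unreplace' branch: expression[i:i+7] is take 7 at the cursor
def unrepGo : List Char → List Char
  | [] => []
  | c :: rest =>
    match decTok (List.take 7 (c :: rest)) with
    | some x => x :: unrepGo (List.drop 6 rest)
    | none => c :: unrepGo rest
termination_by s => s.length
decreasing_by
  · simp only [List.length_cons, List.length_drop]; omega
  · simp only [List.length_cons]; omega

def replchars_alt (expression : String) (mode : String) : String :=
  if mode == "replace" then String.ofList (expression.toList.flatMap encTok)
  else if mode == "unreplace" then String.ofList (unrepGo expression.toList)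
  else expression

-- ===== PRECONDITION & SPEC =====
def Spec_replchars (expression : String) (mode : String) (out : String) : Prop := out = replchars_alt expression mode
instance (expression : String) (mode : String) (out : String) : Decidable (Spec_replchars expression mode out) := by unfold Spec_replchars; infer_instance

-- ===== CLAIM (what is proved, stated in full; the proofs are below) =====
def Claim_equal_replchars : Prop := ∀ (expression : String) (mode : String), Dom_replchars expression mode → Spec_replchars expression mode (replchars expression mode)

-- ===== LEMMAS AND PROOFS =====

def tok (d : Char) : List Char := ['(', 'c', 'h', 'a', 'r', d, ')']

def pvPairs : List (Char × Char) :=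
  [('1', '\\'), ('2', '/'), ('3', ':'), ('4', '*'), ('5', '?'),
   ('6', '"'), ('7', '<'), ('8', '>'), ('9', '|')]

-- single left-to-right scan replacing the first match of t by x (the shape of Chars.replace)
def scanT (t : List Char) (x : Char) : List Char → List Char
  | [] => []
  | c :: r =>
    if t.isPrefixOf (c :: r) then x :: scanT t x (List.drop (t.length - 1) r)
    else c :: scanT t x r
termination_by s => s.length
decreasing_by
  · simp only [List.length_cons, List.length_drop]; omega
  · simp only [List.length_cons]; omega

theorem go_eq_scanT (t : List Char) (x : Char) (ht : t ≠ []) :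
    ∀ (fuel : Nat) (s acc : List Char), s.length ≤ fuel →
      PySem.Chars.replace.go t [x] fuel s acc = acc.reverse ++ scanT t x s := by
  intro fuel
  induction fuel with
  | zero =>
    intro s acc hs
    have : s = [] := List.eq_nil_of_length_eq_zero (Nat.le_zero.mp hs)
    subst this
    simp [PySem.Chars.replace.go, scanT]
  | succ n ih =>
    intro s acc hs
    cases s with
    | nil => simp [PySem.Chars.replace.go, scanT]
    | cons c r =>
      rw [scanT]
      by_cases hp : t.isPrefixOf (c :: r)
      · obtain ⟨t0, tr, ht0⟩ : ∃ t0 tr, t = t0 :: tr := by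
          cases t with
          | nil => exact absurd rfl ht
          | cons a b => exact ⟨a, b, rfl⟩
        subst ht0
        rw [PySem.Chars.replace.go, if_pos hp]
        have hlen : (List.drop (t0 :: tr).length (c :: r)).length ≤ n := by
          simp only [List.length_drop, List.length_cons] at hs ⊢
          omega
        rw [ih _ _ hlen, if_pos hp]
        have hdrop : List.drop (t0 :: tr).length (c :: r) = List.drop ((t0 :: tr).length - 1) r := by
          simp [List.drop_succ_cons]
        simp [hdrop]
      · rw [PySem.Chars.replace.go, if_neg hp, if_neg hp]
        have hlen : r.length ≤ n := by simp only [List.length_cons] at hs; omega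
        rw [ih _ _ hlen]
        simp

theorem replace_eq_scanT (s t : List Char) (x : Char) (ht : t ≠ []) :
    PySem.Chars.replace s t [x] = scanT t x s := by
  rw [PySem.Chars.replace, if_neg (by simp [List.isEmpty_iff, ht])]
  simpa using go_eq_scanT t x ht s.length s [] le_rfl

theorem go_one (d : Char) (p : List Char) :
    ∀ (fuel : Nat) (s acc : List Char), s.length ≤ fuel →
      PySem.Chars.replace.go [d] p fuel s acc
        = acc.reverse ++ s.flatMap (fun c => if c = d then p else [c]) := by
  intro fuel
  induction fuel with
  | zero =>
    intro s acc hs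
    have : s = [] := List.eq_nil_of_length_eq_zero (Nat.le_zero.mp hs)
    subst this
    simp [PySem.Chars.replace.go]
  | succ n ih =>
    intro s acc hs
    cases s with
    | nil => simp [PySem.Chars.replace.go]
    | cons c r =>
      have hlen : r.length ≤ n := by simp only [List.length_cons] at hs; omega
      rw [PySem.Chars.replace.go]
      by_cases hc : c = d
      · rw [if_pos (by simp [List.isPrefixOf, hc])]
        have : List.drop ([d] : List Char).length (c :: r) = r := by simp
        rw [this, ih _ _ hlen]
        simp [hc]
      · rw [if_neg (by simp [List.isPrefixOf]; exact fun h => hc h.symm)]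
        rw [ih _ _ hlen]
        simp [hc]

theorem replace_one (s : List Char) (d : Char) (p : List Char) :
    PySem.Chars.replace s [d] p = s.flatMap (fun c => if c = d then p else [c]) := by
  rw [PySem.Chars.replace, if_neg (by simp)]
  simpa using go_one d p s.length s [] le_rfl

theorem scanT_nil (t : List Char) (x : Char) : scanT t x [] = [] := by rw [scanT]

theorem scanT_cons_neg (t : List Char) (x c : Char) (r : List Char) (h : ¬ t <+: c :: r) :
    scanT t x (c :: r) = c :: scanT t x r := by
  rw [scanT, if_neg (by simpa [List.isPrefixOf_iff_prefix] using h)]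

theorem scanT_pass (d e x : Char) (h : d ≠ e) (m : List Char) :
    scanT (tok d) x (tok e ++ m) = tok e ++ scanT (tok d) x m := by
  show scanT (tok d) x ('(' :: 'c' :: 'h' :: 'a' :: 'r' :: e :: ')' :: m)
      = '(' :: 'c' :: 'h' :: 'a' :: 'r' :: e :: ')' :: scanT (tok d) x m
  rw [scanT_cons_neg _ _ _ _ (by simp [tok, List.cons_prefix_cons, h]),
      scanT_cons_neg _ _ _ _ (by simp [tok, List.cons_prefix_cons]),
      scanT_cons_neg _ _ _ _ (by simp [tok, List.cons_prefix_cons]),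
      scanT_cons_neg _ _ _ _ (by simp [tok, List.cons_prefix_cons]),
      scanT_cons_neg _ _ _ _ (by simp [tok, List.cons_prefix_cons]),
      scanT_cons_neg _ _ _ _ (by simp [tok, List.cons_prefix_cons]),
      scanT_cons_neg _ _ _ _ (by simp [tok, List.cons_prefix_cons])]

theorem scanT_hit (d x : Char) (m : List Char) :
    scanT (tok d) x (tok d ++ m) = x :: scanT (tok d) x m := by
  show scanT (tok d) x ('(' :: 'c' :: 'h' :: 'a' :: 'r' :: d :: ')' :: m)
      = x :: scanT (tok d) x m
  rw [scanT, if_pos (by simp [tok, List.isPrefixOf_iff_prefix, List.cons_prefix_cons])]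
  simp [tok]

theorem scanT_skip (d x c : Char) (m : List Char) (h : c ≠ '(') :
    scanT (tok d) x (c :: m) = c :: scanT (tok d) x m :=
  scanT_cons_neg _ _ _ _ (by simp [tok, List.cons_prefix_cons]; intro h'; exact absurd h'.symm h)

theorem scanT_transport (d x : Char) :
    ∀ (n : Nat) (s u : List Char), s.length ≤ n → x ∉ u → u <+: scanT (tok d) x s → u <+: s := by
  intro n
  induction n with
  | zero =>
    intro s u hs _ hp
    have : s = [] := List.eq_nil_of_length_eq_zero (Nat.le_zero.mp hs)
    subst this
    rwa [scanT_nil] at hp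
  | succ n ih =>
    intro s u hs hx hp
    cases s with
    | nil => rwa [scanT_nil] at hp
    | cons c r =>
      rw [scanT] at hp
      split_ifs at hp with hpre
      · cases u with
        | nil => exact List.nil_prefix
        | cons y u' =>
          rw [List.cons_prefix_cons] at hp
          exact absurd (hp.1 ▸ (List.mem_cons_self ..)) hx
      · cases u with
        | nil => exact List.nil_prefix
        | cons y u' =>
          rw [List.cons_prefix_cons] at hp ⊢
          have hlen : r.length ≤ n := by simp only [List.length_cons] at hs; omega
          exact ⟨hp.1, ih r u' hlen (fun h => hx (List.mem_cons_of_mem _ h)) hp.2⟩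

def chainScan (ps : List (Char × Char)) (s : List Char) : List Char :=
  ps.foldl (fun e p => scanT (tok p.1) p.2 e) s

theorem chainScan_nil (ps : List (Char × Char)) : chainScan ps [] = [] := by
  induction ps with
  | nil => rfl
  | cons p ps ih => simp [chainScan, List.foldl_cons, scanT_nil] at ih ⊢; exact ih

theorem chainScan_cons (ps : List (Char × Char)) :
    ∀ (c : Char) (r : List Char),
      (∀ p ∈ ps, ¬ tok p.1 <+: c :: r) →
      (∀ p ∈ ps, ∀ q ∈ ps, p.2 ∉ tok q.1) →
      chainScan ps (c :: r) = c :: chainScan ps r := by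
  induction ps with
  | nil => intro c r _ _; rfl
  | cons p ps ih =>
    intro c r hnp hd
    have hstep : scanT (tok p.1) p.2 (c :: r) = c :: scanT (tok p.1) p.2 r :=
      scanT_cons_neg _ _ _ _ (hnp p (List.mem_cons_self ..))
    show chainScan ps (scanT (tok p.1) p.2 (c :: r)) = c :: chainScan ps (scanT (tok p.1) p.2 r)
    rw [hstep]
    apply ih c (scanT (tok p.1) p.2 r)
    · intro q hq hpre
      have hq' : q ∈ p :: ps := List.mem_cons_of_mem p hq
      have hto : tok q.1 = '(' :: ['c', 'h', 'a', 'r', q.1, ')'] := rfl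
      rw [hto, List.cons_prefix_cons] at hpre
      have hnotin : p.2 ∉ (['c', 'h', 'a', 'r', q.1, ')'] : List Char) := by
        have hx2 := hd p (List.mem_cons_self ..) q hq'
        rw [hto] at hx2
        intro hmem; exact hx2 (List.mem_cons_of_mem _ hmem)
      have htr := scanT_transport p.1 p.2 r.length r _ le_rfl hnotin hpre.2
      exact hnp q hq' (by rw [hto, List.cons_prefix_cons]; exact ⟨hpre.1, htr⟩)
    · intro a ha b hb
      exact hd a (List.mem_cons_of_mem _ ha) b (List.mem_cons_of_mem _ hb)

theorem chainScan_pass (ps : List (Char × Char)) (e : Char) :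
    ∀ (m : List Char), (∀ p ∈ ps, p.1 ≠ e) →
      chainScan ps (tok e ++ m) = tok e ++ chainScan ps m := by
  induction ps with
  | nil => intro m _; rfl
  | cons p ps ih =>
    intro m h
    show chainScan ps (scanT (tok p.1) p.2 (tok e ++ m)) = tok e ++ chainScan ps (scanT (tok p.1) p.2 m)
    rw [scanT_pass p.1 e p.2 (h p (List.mem_cons_self ..)) m]
    exact ih _ (fun q hq => h q (List.mem_cons_of_mem _ hq))

theorem chainScan_skip (ps : List (Char × Char)) (x : Char) (hx : x ≠ '(') :
    ∀ (m : List Char), chainScan ps (x :: m) = x :: chainScan ps m := by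
  induction ps with
  | nil => intro m; rfl
  | cons p ps ih =>
    intro m
    show chainScan ps (scanT (tok p.1) p.2 (x :: m)) = x :: chainScan ps (scanT (tok p.1) p.2 m)
    rw [scanT_skip p.1 p.2 x m hx]
    exact ih _

theorem chain_split_hit (ps1 ps2 : List (Char × Char)) (p : Char × Char) (m : List Char)
    (h1 : ∀ q ∈ ps1, q.1 ≠ p.1) (h2 : p.2 ≠ '(') :
    chainScan (ps1 ++ p :: ps2) (tok p.1 ++ m)
      = p.2 :: chainScan (ps1 ++ p :: ps2) m := by
  simp only [chainScan, List.foldl_append, List.foldl_cons]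
  rw [show (ps1.foldl (fun e q => scanT (tok q.1) q.2 e) (tok p.1 ++ m))
        = tok p.1 ++ ps1.foldl (fun e q => scanT (tok q.1) q.2 e) m from chainScan_pass ps1 p.1 m h1]
  rw [scanT_hit]
  exact chainScan_skip ps2 p.2 h2 _

theorem decTok_some (t : List Char) (y : Char) (h : decTok t = some y) :
    ∃ p ∈ pvPairs, t = tok p.1 ∧ y = p.2 := by
  rw [decTok] at h
  split_ifs at h with h1 h2 h3 h4 h5 h6 h7 h8 h9 <;>
    first
      | exact ⟨('1', '\\'), by decide, by simpa using h1, by simpa using h.symm⟩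
      | exact ⟨('2', '/'), by decide, by simpa using h2, by simpa using h.symm⟩
      | exact ⟨('3', ':'), by decide, by simpa using h3, by simpa using h.symm⟩
      | exact ⟨('4', '*'), by decide, by simpa using h4, by simpa using h.symm⟩
      | exact ⟨('5', '?'), by decide, by simpa using h5, by simpa using h.symm⟩
      | exact ⟨('6', '"'), by decide, by simpa using h6, by simpa using h.symm⟩
      | exact ⟨('7', '<'), by decide, by simpa using h7, by simpa using h.symm⟩
      | exact ⟨('8', '>'), by decide, by simpa using h8, by simpa using h.symm⟩
      | exact ⟨('9', '|'), by decide, by simpa using h9, by simpa using h.symm⟩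

theorem unrepGo_hit (p : Char × Char) (hp : p ∈ pvPairs) (m : List Char) :
    unrepGo (tok p.1 ++ m) = p.2 :: unrepGo m := by
  have hshape : tok p.1 ++ m = '(' :: (['c', 'h', 'a', 'r', p.1, ')'] ++ m) := rfl
  rw [hshape, unrepGo]
  have htake : List.take 7 ('(' :: (['c', 'h', 'a', 'r', p.1, ')'] ++ m)) = tok p.1 := by
    simp [tok, List.take]
  rw [htake]
  have hdec : decTok (tok p.1) = some p.2 := by
    fin_cases hp <;> decide
  rw [hdec]
  simp [List.drop]

theorem chain_eq_unrep :
    ∀ (n : Nat) (s : List Char), s.length ≤ n → chainScan pvPairs s = unrepGo s := by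
  intro n
  induction n with
  | zero =>
    intro s hs
    have : s = [] := List.eq_nil_of_length_eq_zero (Nat.le_zero.mp hs)
    subst this
    rw [chainScan_nil, unrepGo]
  | succ n ih =>
    intro s hs
    cases s with
    | nil => rw [chainScan_nil, unrepGo]
    | cons c r =>
      by_cases hex : ∃ p ∈ pvPairs, tok p.1 <+: c :: r
      · obtain ⟨p, hp, hpre⟩ := hex
        obtain ⟨m, hm⟩ := hpre
        obtain ⟨ps1, ps2, hsplit⟩ := List.append_of_mem hp
        have h1 : ∀ q ∈ ps1, q.1 ≠ p.1 := by
          have hnd : (pvPairs.map Prod.fst).Nodup := by decide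
          rw [hsplit] at hnd
          simp only [List.map_append, List.map_cons, List.nodup_append] at hnd
          intro q hq heq
          have hmm : p.1 ∈ ps1.map Prod.fst := by
            rw [← heq]; exact List.mem_map_of_mem hq
          exact hnd.2.2 p.1 hmm p.1 (List.mem_cons_self ..) rfl
        have h2 : p.2 ≠ '(' := by
          have : ∀ q ∈ pvPairs, q.2 ≠ '(' := by decide
          exact this p hp
        have hmlen : m.length ≤ n := by
          have hml : (tok p.1 ++ m).length = (c :: r).length := by rw [hm]
          simp only [List.length_append, List.length_cons, tok, List.length_cons,
            List.length_nil] at hml hs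
          omega
        rw [← hm, hsplit, chain_split_hit ps1 ps2 p m h1 h2, ← hsplit,
            ih m hmlen, unrepGo_hit p hp m]
      · push_neg at hex
        have hd : ∀ p ∈ pvPairs, ∀ q ∈ pvPairs, p.2 ∉ tok q.1 := by decide
        rw [chainScan_cons pvPairs c r hex hd]
        have hlen : r.length ≤ n := by simp only [List.length_cons] at hs; omega
        rw [ih r hlen, unrepGo]
        cases hdt : decTok (List.take 7 (c :: r)) with
        | none => rfl
        | some y =>
          obtain ⟨p, hp, ht, _⟩ := decTok_some _ _ hdt
          exact absurd (ht ▸ List.take_prefix 7 (c :: r)) (hex p hp)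

-- replace-mode chain
def encPairs : List (Char × List Char) :=
  [('\\', "(char1)".toList), ('/', "(char2)".toList), (':', "(char3)".toList),
   ('*', "(char4)".toList), ('?', "(char5)".toList), ('"', "(char6)".toList),
   ('<', "(char7)".toList), ('>', "(char8)".toList), ('|', "(char9)".toList)]

def chainRep (ps : List (Char × List Char)) (s : List Char) : List Char :=
  ps.foldl (fun e p => PySem.Chars.replace e [p.1] p.2) s

theorem chainRep_nil (ps : List (Char × List Char)) : chainRep ps [] = [] := by
  induction ps with
  | nil => rfl
  | cons p ps ih =>
    show chainRep ps (PySem.Chars.replace [] [p.1] p.2) = []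
    rw [replace_one]
    simpa using ih

theorem chainRep_append (ps : List (Char × List Char)) :
    ∀ (a b : List Char), chainRep ps (a ++ b) = chainRep ps a ++ chainRep ps b := by
  induction ps with
  | nil => intro a b; rfl
  | cons p ps ih =>
    intro a b
    show chainRep ps (PySem.Chars.replace (a ++ b) [p.1] p.2)
        = chainRep ps (PySem.Chars.replace a [p.1] p.2) ++ chainRep ps (PySem.Chars.replace b [p.1] p.2)
    rw [replace_one, replace_one, replace_one, List.flatMap_append, ih]

theorem chainRep_enc (c : Char) : chainRep encPairs [c] = encTok c := by
  by_cases h1 : c = '\\'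
  · subst h1; decide
  by_cases h2 : c = '/'
  · subst h2; decide
  by_cases h3 : c = ':'
  · subst h3; decide
  by_cases h4 : c = '*'
  · subst h4; decide
  by_cases h5 : c = '?'
  · subst h5; decide
  by_cases h6 : c = '"'
  · subst h6; decide
  by_cases h7 : c = '<'
  · subst h7; decide
  by_cases h8 : c = '>'
  · subst h8; decide
  by_cases h9 : c = '|'
  · subst h9; decide
  simp [chainRep, encPairs, List.foldl, replace_one, List.flatMap, encTok,
    h1, h2, h3, h4, h5, h6, h7, h8, h9]

theorem chain_eq_enc (s : List Char) : chainRep encPairs s = s.flatMap encTok := by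
  induction s with
  | nil => rw [chainRep_nil]; rfl
  | cons c r ih =>
    have : (c :: r : List Char) = [c] ++ r := rfl
    rw [this, chainRep_append, chainRep_enc, ih, List.flatMap_append]
    simp

set_option maxHeartbeats 2000000 in
theorem keys_eval : pvDictchars.keys = ["\\", "/", ":", "*", "?", "\"", "<", ">", "|"] := by decide

-- ===== VERDICT (by name: the statement is the Claim_ definition above) =====
set_option maxHeartbeats 2000000 in
theorem replchars_spec : Claim_equal_replchars := by
  unfold Claim_equal_replchars
  intro e mode _
  unfold Spec_replchars
  have hts1 : ("\\" : String).toList = ['\\'] := by decide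
  have hts2 : ("/" : String).toList = ['/'] := by decide
  have hts3 : (":" : String).toList = [':'] := by decide
  have hts4 : ("*" : String).toList = ['*'] := by decide
  have hts5 : ("?" : String).toList = ['?'] := by decide
  have hts6 : ("\"" : String).toList = ['"'] := by decide
  have hts7 : ("<" : String).toList = ['<'] := by decide
  have hts8 : (">" : String).toList = ['>'] := by decide
  have hts9 : ("|" : String).toList = ['|'] := by decide
  by_cases hm1 : mode = "replace"
  · subst hm1
    have hB : replchars_alt e "replace" = String.ofList (e.toList.flatMap encTok) := rfl
    have hA : replchars e "replace"
        = PySem.Str.replace (PySem.Str.replace (PySem.Str.replace (PySem.Str.replace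
            (PySem.Str.replace (PySem.Str.replace (PySem.Str.replace (PySem.Str.replace
            (PySem.Str.replace e "\\" "(char1)") "/" "(char2)") ":" "(char3)") "*" "(char4)")
            "?" "(char5)") "\"" "(char6)") "<" "(char7)") ">" "(char8)") "|" "(char9)" := rfl
    rw [hA, hB]
    apply String.toList_inj.mp
    simp only [PySem.Str.toList_replace, String.toList_ofList]
    have h0 := chain_eq_enc e.toList
    simp only [chainRep, encPairs, List.foldl_cons, List.foldl_nil] at h0
    simp only [hts1, hts2, hts3, hts4, hts5, hts6, hts7, hts8, hts9]
    exact h0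
  by_cases hm2 : mode = "unreplace"
  · subst hm2
    have htk1 : ("(char1)" : String).toList = tok '1' := by decide
    have htk2 : ("(char2)" : String).toList = tok '2' := by decide
    have htk3 : ("(char3)" : String).toList = tok '3' := by decide
    have htk4 : ("(char4)" : String).toList = tok '4' := by decide
    have htk5 : ("(char5)" : String).toList = tok '5' := by decide
    have htk6 : ("(char6)" : String).toList = tok '6' := by decide
    have htk7 : ("(char7)" : String).toList = tok '7' := by decide
    have htk8 : ("(char8)" : String).toList = tok '8' := by decide
    have htk9 : ("(char9)" : String).toList = tok '9' := by decide
    have hB : replchars_alt e "unreplace" = String.ofList (unrepGo e.toList) := rfl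
    have hA : replchars e "unreplace"
        = PySem.Str.replace (PySem.Str.replace (PySem.Str.replace (PySem.Str.replace
            (PySem.Str.replace (PySem.Str.replace (PySem.Str.replace (PySem.Str.replace
            (PySem.Str.replace e "(char1)" "\\") "(char2)" "/") "(char3)" ":") "(char4)" "*")
            "(char5)" "?") "(char6)" "\"") "(char7)" "<") "(char8)" ">") "(char9)" "|" := rfl
    rw [hA, hB]
    apply String.toList_inj.mp
    simp only [PySem.Str.toList_replace, String.toList_ofList]
    have h0 : chainScan pvPairs e.toList = unrepGo e.toList :=
      chain_eq_unrep e.toList.length e.toList le_rfl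
    simp only [chainScan, pvPairs, List.foldl_cons, List.foldl_nil] at h0
    have hrep : ∀ (s : List Char) (d x : Char),
        PySem.Chars.replace s (tok d) [x] = scanT (tok d) x s := by
      intro s d x
      exact replace_eq_scanT s (tok d) x (by simp [tok])
    simp only [htk1, htk2, htk3, htk4, htk5, htk6, htk7, htk8, htk9,
      hts1, hts2, hts3, hts4, hts5, hts6, hts7, hts8, hts9, hrep]
    exact h0
  · have h1 : (mode == "replace") = false := by simpa using hm1
    have h2 : (mode == "unreplace") = false := by simpa using hm2
    have hA : replchars e mode = e := by
      rw [replchars, keys_eval]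
      simp only [List.foldl_cons, List.foldl_nil, h1, h2]
      simp
    have hB : replchars_alt e mode = e := by
      rw [replchars_alt]
      simp [h1, h2]
    rw [hA, hB]
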